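-- pv_equiv track=rewrite | github.com/Nhatminh248/ML_HW5 | HW_GA.py | bitstring_to_rule
-- ===== SOURCE A (Python) =====
-- def bitstring_to_rule(bitstring, attributes):
--     """
--     Convert a bit-string to a human-readable rule.
--     Bit-string format:
--     - For each attribute value, there's a bit indicating whether it's included in the rule (1) or not (0)
--     - The sequence is [Outlook_Sunny, Outlook_Overcast, Outlook_Rain, Temp_Hot, Temp_Mild, ...]
--     """
--     rule_parts = []
--     idx = 0
--
--     for attr, values in attributes.items():
--         attr_conditions = []
--         for val in values:
--             if bitstring[idx] == 1:
--                 attr_conditions.append(f"{attr}={val}")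
--             idx += 1
--
--         if attr_conditions:
--             if len(attr_conditions) == 1:
--                 rule_parts.append(attr_conditions[0])
--             else:
--                 rule_parts.append(f"({' OR '.join(attr_conditions)})")
--
--     if not rule_parts:
--         return "True"  # Always matches
--     return " AND ".join(rule_parts)
-- ===== SOURCE B (Python) =====
-- def bitstring_to_rule(bitstring, attributes):
--     # Flatten to (attr, val) pairs, keep those whose bit is 1, then select per attribute.
--     pairs = [(attr, val) for attr, values in attributes.items() for val in values]
--     kept = [pair for i, pair in enumerate(pairs) if bitstring[i] == 1]
--     parts = []
--     for attr in attributes: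
--         conds = [f"{attr}={val}" for a, val in kept if a == attr]
--         if len(conds) == 1:
--             parts.append(conds[0])
--         elif conds:
--             parts.append(f"({' OR '.join(conds)})")
--     return " AND ".join(parts) if parts else "True"
-- ===== Notes on version B (the rewrite author's own statement) =====
-- stated objective: alternative
-- what changed: A makes one pass over attributes with a running bit index and an inner accumulator per attribute; B first flattens the attributes to an indexed list of (attr, val) pairs, filters it by the bitstring in one comprehension, and then regroups the surviving pairs per attribute key to render the rule.
import Mathlib
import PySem

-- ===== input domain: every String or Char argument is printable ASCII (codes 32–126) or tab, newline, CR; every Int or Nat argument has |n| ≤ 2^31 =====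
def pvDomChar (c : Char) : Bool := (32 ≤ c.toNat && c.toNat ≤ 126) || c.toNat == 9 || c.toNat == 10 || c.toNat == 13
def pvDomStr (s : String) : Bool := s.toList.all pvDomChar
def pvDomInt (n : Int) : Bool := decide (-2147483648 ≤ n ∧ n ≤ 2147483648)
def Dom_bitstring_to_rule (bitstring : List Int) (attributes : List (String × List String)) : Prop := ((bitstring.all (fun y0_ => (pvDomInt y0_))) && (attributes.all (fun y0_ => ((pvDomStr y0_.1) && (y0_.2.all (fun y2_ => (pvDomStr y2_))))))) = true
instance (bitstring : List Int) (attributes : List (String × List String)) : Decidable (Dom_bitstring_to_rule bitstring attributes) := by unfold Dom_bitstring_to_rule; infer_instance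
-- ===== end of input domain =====

-- B replaces A's single pass with a running bit index by a flatten-filter-regroup pipeline
-- (objective: alternative decomposition, same cost). Equality of return values is proved.

-- ===== PORT A =====
-- A: one pass over attributes, an inner pass over each value list with a running index idx.
def bitstring_to_rule (bitstring : List Int) (attributes : List (String × List String)) : String :=
  let st := attributes.foldl (fun (st : List String × Int) p =>
    let inner := p.2.foldl (fun (st2 : List String × Int) val =>
      (if PySem.List.pyGetD bitstring st2.2 0 = 1 then st2.1 ++ [p.1 ++ "=" ++ val] else st2.1,
       st2.2 + 1)) (([] : List String), st.2)
    (if inner.1 ≠ [] then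
      (if inner.1.length = 1 then st.1 ++ [inner.1.headD ""]
       else st.1 ++ ["(" ++ PySem.Str.join " OR " inner.1 ++ ")"])
     else st.1,
     inner.2)) (([] : List String), (0 : Int))
  if st.1 = [] then "True" else PySem.Str.join " AND " st.1

-- ===== PORT B =====
-- B: flatten to (attr, val) pairs, keep those whose bit is 1, then select per attribute key.
def bitstring_to_rule_alt (bitstring : List Int) (attributes : List (String × List String)) : String :=
  let pairs := attributes.flatMap (fun p => p.2.map (fun v => (p.1, v)))
  let kept := (PySem.List.enumerate pairs).filterMap
    (fun ip => if PySem.List.pyGetD bitstring ip.1 0 = 1 then some ip.2 else none)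
  let parts := attributes.foldl (fun parts p =>
    let conds := kept.filterMap
      (fun av => if av.1 = p.1 then some (p.1 ++ "=" ++ av.2) else none)
    if conds.length = 1 then parts ++ [conds.headD ""]
    else if conds ≠ [] then parts ++ ["(" ++ PySem.Str.join " OR " conds ++ ")"]
    else parts) ([] : List String)
  if parts = [] then "True" else PySem.Str.join " AND " parts

-- ===== PRECONDITION & SPEC =====
-- Pre_ excludes (a) bitstrings shorter than the total number of attribute values, on which the
-- Python A raises IndexError, and (b) association lists with duplicate attribute keys, which do
-- not represent any Python dict (A's parameter is a dict, so such inputs are unreachable).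
def Pre_bitstring_to_rule (bitstring : List Int) (attributes : List (String × List String)) : Prop :=
  (attributes.map Prod.fst).Nodup ∧
  (attributes.map (fun p => p.2.length)).sum ≤ bitstring.length
instance (bitstring : List Int) (attributes : List (String × List String)) : Decidable (Pre_bitstring_to_rule bitstring attributes) := by unfold Pre_bitstring_to_rule; infer_instance

def pvWitness_bitstring_to_rule : List Int × (List (String × List String)) :=
  ([1, 0, 1], [("Outlook", ["Sunny", "Rain"]), ("Temp", ["Hot"])])

def Spec_bitstring_to_rule (bitstring : List Int) (attributes : List (String × List String)) (out : String) : Prop := out = bitstring_to_rule_alt bitstring attributes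
instance (bitstring : List Int) (attributes : List (String × List String)) (out : String) : Decidable (Spec_bitstring_to_rule bitstring attributes out) := by unfold Spec_bitstring_to_rule; infer_instance

-- ===== CLAIM (what is proved, stated in full; the proofs are below) =====
def Claim_equal_bitstring_to_rule : Prop := ∀ (bitstring : List Int) (attributes : List (String × List String)), Dom_bitstring_to_rule bitstring attributes → Pre_bitstring_to_rule bitstring attributes → Spec_bitstring_to_rule bitstring attributes (bitstring_to_rule bitstring attributes)

-- ===== LEMMAS AND PROOFS =====

-- Conditions produced for one attribute (a, vs) whose first bit sits at offset off.
def pvSeg (bs : List Int) (a : String) (vs : List String) (off : Int) : List String :=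
  (PySem.List.enumerate vs off).filterMap
    (fun jv => if PySem.List.pyGetD bs jv.1 0 = 1 then some (a ++ "=" ++ jv.2) else none)

-- Kept (attr, val) pairs contributed by one attribute.
def pvKeptSeg (bs : List Int) (a : String) (vs : List String) (off : Int) : List (String × String) :=
  (PySem.List.enumerate vs off).filterMap
    (fun jv => if PySem.List.pyGetD bs jv.1 0 = 1 then some (a, jv.2) else none)

def pvKeptRef (bs : List Int) : List (String × List String) → Int → List (String × String)
  | [], _ => []
  | p :: rest, off => pvKeptSeg bs p.1 p.2 off ++ pvKeptRef bs rest (off + p.2.length)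

def pvRender (c : List String) : List String :=
  if c.length = 1 then [c.headD ""]
  else if c ≠ [] then ["(" ++ PySem.Str.join " OR " c ++ ")"]
  else []

def pvParts (bs : List Int) : List (String × List String) → Int → List String
  | [], _ => []
  | p :: rest, off => pvRender (pvSeg bs p.1 p.2 off) ++ pvParts bs rest (off + p.2.length)

theorem pv_A_inner (bs : List Int) (a : String) :
    ∀ (vs : List String) (acc : List String) (off : Int),
    vs.foldl (fun (st2 : List String × Int) val =>
      (if PySem.List.pyGetD bs st2.2 0 = 1 then st2.1 ++ [a ++ "=" ++ val] else st2.1,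
       st2.2 + 1)) (acc, off)
    = (acc ++ pvSeg bs a vs off, off + vs.length) := by
  intro vs
  induction vs with
  | nil => intro acc off; simp [pvSeg, PySem.List.enumerate_nil]
  | cons v vs ih =>
    intro acc off
    simp only [List.foldl_cons, ih, pvSeg, PySem.List.enumerate_cons, List.filterMap_cons]
    split_ifs with h <;> simp [List.append_assoc] <;> omega

theorem pv_renderA (acc c : List String) :
    (if c ≠ [] then
      (if c.length = 1 then acc ++ [c.headD ""]
       else acc ++ ["(" ++ PySem.Str.join " OR " c ++ ")"])
     else acc) = acc ++ pvRender c := by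
  unfold pvRender
  split_ifs <;> simp_all

theorem pv_renderB (acc c : List String) :
    (if c.length = 1 then acc ++ [c.headD ""]
     else if c ≠ [] then acc ++ ["(" ++ PySem.Str.join " OR " c ++ ")"]
     else acc) = acc ++ pvRender c := by
  unfold pvRender
  split_ifs <;> simp_all

theorem pv_keptSeg_fst (bs : List Int) (a : String) (vs : List String) (off : Int)
    (av : String × String) (h : av ∈ pvKeptSeg bs a vs off) : av.1 = a := by
  unfold pvKeptSeg at h
  rcases List.mem_filterMap.1 h with ⟨jv, _, hjv⟩
  by_cases hb : PySem.List.pyGetD bs jv.1 0 = 1 <;> simp [hb] at hjv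
  rw [← hjv]

theorem pv_A_outer (bs : List Int) :
    ∀ (l : List (String × List String)) (acc : List String) (off : Int),
    l.foldl (fun (st : List String × Int) p =>
      (if pvSeg bs p.1 p.2 st.2 ≠ [] then
        (if (pvSeg bs p.1 p.2 st.2).length = 1 then st.1 ++ [(pvSeg bs p.1 p.2 st.2).headD ""]
         else st.1 ++ ["(" ++ PySem.Str.join " OR " (pvSeg bs p.1 p.2 st.2) ++ ")"])
       else st.1,
       st.2 + (p.2.length : Int))) (acc, off)
    = (acc ++ pvParts bs l off, off + ((l.map (fun p => (p.2.length : Int))).sum)) := by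
  intro l
  induction l with
  | nil => intro acc off; simp [pvParts]
  | cons p rest ih =>
    intro acc off
    simp only [List.foldl_cons]
    rw [pv_renderA, ih]
    simp only [pvParts, List.map_cons, List.sum_cons, Prod.mk.injEq, List.append_assoc, true_and]
    omega

theorem pv_enumerate_map {α β : Type} (g : α → β) :
    ∀ (xs : List α) (s : Int),
    PySem.List.enumerate (xs.map g) s = (PySem.List.enumerate xs s).map (fun jv => (jv.1, g jv.2)) := by
  intro xs
  induction xs with
  | nil => intro s; simp [PySem.List.enumerate_nil]
  | cons x xs ih => intro s; simp [PySem.List.enumerate_cons, ih]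

theorem pv_B_kept (bs : List Int) :
    ∀ (l : List (String × List String)) (off : Int),
    (PySem.List.enumerate (l.flatMap (fun p => p.2.map (fun v => (p.1, v)))) off).filterMap
      (fun ip => if PySem.List.pyGetD bs ip.1 0 = 1 then some ip.2 else none)
    = pvKeptRef bs l off := by
  intro l
  induction l with
  | nil => intro off; simp [pvKeptRef, PySem.List.enumerate_nil]
  | cons p rest ih =>
    intro off
    simp only [List.flatMap_cons, PySem.List.enumerate_append, List.filterMap_append,
      List.length_map, pv_enumerate_map, List.filterMap_map, pvKeptRef, ih, pvKeptSeg,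
      Function.comp]

theorem pv_sel_keptSeg_eq (bs : List Int) (a : String) (vs : List String) (off : Int) :
    (pvKeptSeg bs a vs off).filterMap
      (fun av => if av.1 = a then some (a ++ "=" ++ av.2) else none) = pvSeg bs a vs off := by
  unfold pvKeptSeg pvSeg
  generalize PySem.List.enumerate vs off = L
  induction L with
  | nil => simp
  | cons jv L ih =>
    simp only [List.filterMap_cons]
    split_ifs <;> simp [ih]

theorem pv_sel_keptSeg_ne (bs : List Int) (a a₀ : String) (h : a ≠ a₀) (vs : List String) (off : Int) :
    (pvKeptSeg bs a vs off).filterMap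
      (fun av => if av.1 = a₀ then some (a₀ ++ "=" ++ av.2) else none) = [] := by
  unfold pvKeptSeg
  generalize PySem.List.enumerate vs off = L
  induction L with
  | nil => simp
  | cons jv L ih =>
    simp only [List.filterMap_cons]
    split_ifs <;> simp [ih, h]

theorem pv_sel_keptRef_ne (bs : List Int) (a₀ : String) :
    ∀ (l : List (String × List String)) (off : Int), a₀ ∉ l.map Prod.fst →
    (pvKeptRef bs l off).filterMap
      (fun av => if av.1 = a₀ then some (a₀ ++ "=" ++ av.2) else none) = [] := by
  intro l
  induction l with
  | nil => intro off _; simp [pvKeptRef]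
  | cons p rest ih =>
    intro off hmem
    simp only [List.map_cons, List.mem_cons, not_or] at hmem
    simp only [pvKeptRef, List.filterMap_append,
      pv_sel_keptSeg_ne bs p.1 a₀ (fun hh => hmem.1 hh.symm) p.2 off,
      ih (off + p.2.length) hmem.2, List.append_nil]

theorem pv_B_outer (bs : List Int) :
    ∀ (l : List (String × List String)) (prevK : List (String × String)) (off : Int) (acc : List String),
    (l.map Prod.fst).Nodup → (∀ av ∈ prevK, av.1 ∉ l.map Prod.fst) →
    l.foldl (fun parts p =>
      if ((prevK ++ pvKeptRef bs l off).filterMap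
            (fun av => if av.1 = p.1 then some (p.1 ++ "=" ++ av.2) else none)).length = 1 then
        parts ++ [((prevK ++ pvKeptRef bs l off).filterMap
            (fun av => if av.1 = p.1 then some (p.1 ++ "=" ++ av.2) else none)).headD ""]
      else if ((prevK ++ pvKeptRef bs l off).filterMap
            (fun av => if av.1 = p.1 then some (p.1 ++ "=" ++ av.2) else none)) ≠ [] then
        parts ++ ["(" ++ PySem.Str.join " OR " ((prevK ++ pvKeptRef bs l off).filterMap
            (fun av => if av.1 = p.1 then some (p.1 ++ "=" ++ av.2) else none)) ++ ")"]
      else parts) acc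
    = acc ++ pvParts bs l off := by
  intro l
  induction l with
  | nil => intro prevK off acc _ _; simp [pvParts]
  | cons p rest ih =>
    intro prevK off acc hnd hprev
    simp only [List.map_cons, List.nodup_cons] at hnd
    rw [show prevK ++ pvKeptRef bs (p :: rest) off
        = (prevK ++ pvKeptSeg bs p.1 p.2 off) ++ pvKeptRef bs rest (off + p.2.length) from by
      simp [pvKeptRef, List.append_assoc]]
    simp only [List.foldl_cons]
    have hconds : ∀ a₀, a₀ = p.1 →
        (((prevK ++ pvKeptSeg bs p.1 p.2 off) ++ pvKeptRef bs rest (off + p.2.length)).filterMap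
          (fun av => if av.1 = a₀ then some (a₀ ++ "=" ++ av.2) else none)) = pvSeg bs p.1 p.2 off := by
      intro a₀ ha; subst ha
      rw [List.filterMap_append, List.filterMap_append, pv_sel_keptSeg_eq,
        pv_sel_keptRef_ne bs p.1 rest (off + p.2.length) hnd.1, List.append_nil]
      have hp : prevK.filterMap
          (fun av => if av.1 = p.1 then some (p.1 ++ "=" ++ av.2) else none) = [] := by
        rw [List.filterMap_eq_nil_iff]
        intro av hav
        have := hprev av hav
        simp only [List.map_cons, List.mem_cons, not_or] at this
        simp [this.1]
      rw [hp, List.nil_append]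
    rw [hconds p.1 rfl, pv_renderB,
      ih (prevK ++ pvKeptSeg bs p.1 p.2 off) (off + p.2.length)
        (acc ++ pvRender (pvSeg bs p.1 p.2 off)) hnd.2 ?_]
    · simp [pvParts, List.append_assoc]
    · intro av hav
      rcases List.mem_append.1 hav with h1 | h2
      · have := hprev av h1
        simp only [List.map_cons, List.mem_cons, not_or] at this
        exact this.2
      · rw [pv_keptSeg_fst bs p.1 p.2 off av h2]
        exact hnd.1


-- ===== VERDICT (by name: the statement is the Claim_ definition above) =====
theorem bitstring_to_rule_spec : Claim_equal_bitstring_to_rule := by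
  intro bs l _ hpre
  unfold Spec_bitstring_to_rule bitstring_to_rule bitstring_to_rule_alt
  simp only [pv_A_inner, List.nil_append]
  rw [pv_A_outer, pv_B_kept,
    show pvKeptRef bs l 0 = [] ++ pvKeptRef bs l 0 from (List.nil_append _).symm,
    pv_B_outer bs l [] 0 [] hpre.1 (by simp)]
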